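-- pv_equiv track=rewrite | github.com/m0r4a/Cryptography | .old/old_v2/functions/matrix_DIY/matrix_determinant_HILL.py | matrix_determinant_HILL
-- ===== SOURCE A (Python) =====
-- def matrix_determinant_HILL(n, matrix):
--     '''
--     This function calcualtes the determinant of the matrix for HILL algorithm
--     the only difference between this and a regular determinant calculation
--     is that the final result will be result mod n
--
--     : param int n: your alphabet size
--     : param list matrix: the matrix which will be the determinant calculated
--     '''
--
--     size = len(matrix)
--     if size == 1:
--         return matrix[0][0]
--
--     # Check if the matrix is square
--     for row in matrix:
--         if len(row) != size:
--             raise ValueError("The matrix must be square (same number of rows and columns)")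
--
--     det = 0
--     for j in range(size):
--         minor = [[matrix[i][k] for k in range(size) if k != j] for i in range(1, size)]
--         det += ((-1) ** j) * matrix[0][j] * matrix_determinant_HILL(n, minor)
--
--     det = det % n
--
--     return det
-- ===== SOURCE B (Python) =====
-- def matrix_determinant_HILL(n, matrix):
--     """Determinant mod n via iterative subset dynamic programming (O(2^s * s))
--     instead of recursive cofactor expansion (O(s!))."""
--     size = len(matrix)
--     if size == 1:
--         return matrix[0][0]
--
--     for row in matrix:
--         if len(row) != size:
--             raise ValueError("The matrix must be square (same number of rows and columns)")
--
--     full = 1 << size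
--     # f[mask] = determinant of the bottom popcount(mask) rows restricted to
--     # the columns whose bits are set in mask
--     f = [0] * full
--     f[0] = 1
--     for mask in range(1, full):
--         row = matrix[size - bin(mask).count("1")]
--         sign = 1
--         acc = 0
--         for c in range(size):
--             if (mask >> c) & 1:
--                 acc += sign * row[c] * f[mask ^ (1 << c)]
--                 sign = -sign
--         f[mask] = acc
--     return f[full - 1] % n
-- ===== Notes on version B (the rewrite author's own statement) =====
-- stated objective: faster
-- what changed: Recursive first-row cofactor expansion that materializes minor matrices is replaced by an iterative bitmask subset dynamic programming over column sets (one table of 2^s entries, no recursion, no submatrix copies), with a single mod at the end.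
-- intended difference: On the empty matrix (with n not 1 or -1) A returns 0 % n = 0 from its leftover accumulator, while B returns 1 % n, the standard convention det([]) = 1 (the empty product), which is the intended value. — e.g. on matrix_determinant_HILL(5, []): A returns 0, B returns 1
import Mathlib
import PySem

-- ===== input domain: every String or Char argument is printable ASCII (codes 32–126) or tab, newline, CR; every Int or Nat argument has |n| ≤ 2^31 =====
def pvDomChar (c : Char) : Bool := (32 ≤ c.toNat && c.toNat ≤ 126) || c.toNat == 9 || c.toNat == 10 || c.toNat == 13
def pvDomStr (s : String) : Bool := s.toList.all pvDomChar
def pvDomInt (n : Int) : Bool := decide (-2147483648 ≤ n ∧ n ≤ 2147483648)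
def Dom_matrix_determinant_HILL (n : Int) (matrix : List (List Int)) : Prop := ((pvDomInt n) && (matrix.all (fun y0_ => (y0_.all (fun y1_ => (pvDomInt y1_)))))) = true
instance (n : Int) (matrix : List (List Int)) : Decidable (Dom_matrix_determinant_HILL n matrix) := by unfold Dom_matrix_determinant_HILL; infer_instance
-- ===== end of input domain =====

-- B replaces A's O(s!) recursive cofactor expansion by an O(2^s * s) iterative bitmask
-- subset dynamic programming (measured much faster); equality of the returned value is
-- proved on Pre_ outside D_ (the empty matrix, where B returns the conventional det = 1).

-- ===== PORT A =====
-- A's explicit square-check loop only raises ValueError; the inputs on which it fires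
-- (non-square matrices) are excluded by Pre_, so the loop has no value to port.
def matrix_determinant_HILL (n : Int) (matrix : List (List Int)) : Int :=
  let size : Int := matrix.length
  if size = 1 then
    PySem.List.pyGetD (PySem.List.pyGetD matrix 0 []) 0 0
  else
    let det : Int :=
      (PySem.List.pyRange 0 size 1).attach.foldl (fun det j =>
        let minor : List (List Int) :=
          (PySem.List.pyRange 1 size 1).map (fun i =>
            ((PySem.List.pyRange 0 size 1).filter (fun k => decide (k ≠ j.1))).map (fun k =>
              PySem.List.pyGetD (PySem.List.pyGetD matrix i []) k 0))
        det + (-1) ^ (j.1.toNat) * PySem.List.pyGetD (PySem.List.pyGetD matrix 0 []) j.1 0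
            * matrix_determinant_HILL n minor) 0
    PySem.Int.mod det n
termination_by matrix.length
decreasing_by
  simp only [List.length_map, PySem.List.length_pyRange_one]
  have hj := (PySem.List.mem_pyRange_one).1 j.2
  omega

-- ===== PORT B =====
-- B's loop indices and bit masks are Python ints that are always nonnegative; they are
-- ported as Nat: (mask>>c)&1, mask^(1<<c), 1<<size become >>>, ^^^, <<< on Nat and
-- bin(mask).count("1") is PySem.Int.bitCount.
def matrix_determinant_HILL_alt (n : Int) (matrix : List (List Int)) : Int :=
  let size : Nat := matrix.length
  if (size : Int) = 1 then
    PySem.List.pyGetD (PySem.List.pyGetD matrix 0 []) 0 0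
  else
    let full : Nat := 1 <<< size
    let f0 : List Int := (List.replicate full 0).set 0 1
    let f : List Int :=
      (List.range' 1 (full - 1)).foldl (fun (f : List Int) (mask : Nat) =>
        let row : List Int := matrix.getD (size - PySem.Int.bitCount (mask : Int)) []
        let sa : Int × Int :=
          (List.range size).foldl (fun sa c =>
            if (mask >>> c) &&& 1 ≠ 0 then
              (- sa.1, sa.2 + sa.1 * row.getD c 0 * f.getD (mask ^^^ (1 <<< c)) 0)
            else sa) (1, 0)
        f.set mask sa.2) f0
    PySem.Int.mod (f.getD (full - 1) 0) n

-- ===== PRECONDITION & SPEC =====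
-- Pre_ excludes exactly the inputs on which the Python A raises: non-square matrices of
-- size ≠ 1 (ValueError), a first row shorter than 1 when size == 1 (IndexError), and
-- n = 0 with size ≠ 1 (ZeroDivisionError in the final `det % n`).
def Pre_matrix_determinant_HILL (n : Int) (matrix : List (List Int)) : Prop :=
  (matrix.length = 1 ∧ 1 ≤ (matrix.headD []).length) ∨
  (matrix.length ≠ 1 ∧ (∀ row ∈ matrix, row.length = matrix.length) ∧ n ≠ 0)
instance (n : Int) (matrix : List (List Int)) : Decidable (Pre_matrix_determinant_HILL n matrix) := by unfold Pre_matrix_determinant_HILL; infer_instance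

def pvWitness_matrix_determinant_HILL : Int × List (List Int) := (26, [[1, 2], [3, 4]])

-- On the empty matrix (with n ∉ {1, -1}) A returns 0 % n = 0 from its never-incremented
-- accumulator, while B returns 1 % n: the standard convention det([]) = 1 (empty product)
-- reduced mod n, which is the intended value.
def D_matrix_determinant_HILL (n : Int) (matrix : List (List Int)) : Prop :=
  matrix = [] ∧ n ≠ 1 ∧ n ≠ -1
instance (n : Int) (matrix : List (List Int)) : Decidable (D_matrix_determinant_HILL n matrix) := by unfold D_matrix_determinant_HILL; infer_instance

def Spec_matrix_determinant_HILL (n : Int) (matrix : List (List Int)) (out : Int) : Prop :=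
  ¬ D_matrix_determinant_HILL n matrix → out = matrix_determinant_HILL_alt n matrix
instance (n : Int) (matrix : List (List Int)) (out : Int) : Decidable (Spec_matrix_determinant_HILL n matrix out) := by unfold Spec_matrix_determinant_HILL; infer_instance

def pvDiffWitness_matrix_determinant_HILL : Int × List (List Int) := (5, [])
def pvDiffWitnessOut_matrix_determinant_HILL : Int × Int := (0, 1)

-- ===== CLAIM (what is proved, stated in full; the proofs are below) =====
def Claim_unchanged_matrix_determinant_HILL : Prop := ∀ (n : Int) (matrix : List (List Int)), Dom_matrix_determinant_HILL n matrix → Pre_matrix_determinant_HILL n matrix → Spec_matrix_determinant_HILL n matrix (matrix_determinant_HILL n matrix)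
def Claim_changed_matrix_determinant_HILL : Prop := Dom_matrix_determinant_HILL (pvDiffWitness_matrix_determinant_HILL.1) (pvDiffWitness_matrix_determinant_HILL.2) ∧ Pre_matrix_determinant_HILL (pvDiffWitness_matrix_determinant_HILL.1) (pvDiffWitness_matrix_determinant_HILL.2) ∧ D_matrix_determinant_HILL (pvDiffWitness_matrix_determinant_HILL.1) (pvDiffWitness_matrix_determinant_HILL.2) ∧ matrix_determinant_HILL (pvDiffWitness_matrix_determinant_HILL.1) (pvDiffWitness_matrix_determinant_HILL.2) = pvDiffWitnessOut_matrix_determinant_HILL.1 ∧ matrix_determinant_HILL_alt (pvDiffWitness_matrix_determinant_HILL.1) (pvDiffWitness_matrix_determinant_HILL.2) = pvDiffWitnessOut_matrix_determinant_HILL.2 ∧ pvDiffWitnessOut_matrix_determinant_HILL.1 ≠ pvDiffWitnessOut_matrix_determinant_HILL.2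
def Claim_exact_matrix_determinant_HILL : Prop := ∀ (n : Int) (matrix : List (List Int)), Dom_matrix_determinant_HILL n matrix → Pre_matrix_determinant_HILL n matrix → D_matrix_determinant_HILL n matrix → matrix_determinant_HILL n matrix ≠ matrix_determinant_HILL_alt n matrix

-- ===== LEMMAS AND PROOFS =====

-- The common specification determinant: detS rows cols is the determinant of the
-- submatrix of `rows` given by the column indices `cols`, by first-row expansion;
-- rowExp carries the already-passed columns `pre` so that "cols minus the j-th" is pre ++ cs.
mutual
def detS : List (List Int) → List Nat → Int
  | [], _ => 1
  | r :: rs, cols => rowExp r rs [] cols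
termination_by rows cols => (rows.length, cols.length + 1)
def rowExp (r : List Int) (rs : List (List Int)) (pre : List Nat) : List Nat → Int
  | [] => 0
  | c :: cs => r.getD c 0 * detS rs (pre ++ cs) - rowExp r rs (pre ++ [c]) cs
termination_by rest => (rs.length + 1, rest.length)
end

-- position-indexed characterisation of rowExp / detS
lemma sum_map_neg {α : Type} (l : List α) (g : α → Int) :
    (l.map (fun x => -g x)).sum = -((l.map g).sum) := by
  induction l with
  | nil => simp
  | cons a l ih => simp [ih]; ring

lemma rowExp_sum (r : List Int) (rs : List (List Int)) :
    ∀ (rest pre : List Nat), rowExp r rs pre rest =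
      ((List.range rest.length).map (fun j => (-1 : Int) ^ j * r.getD (rest.getD j 0) 0 *
        detS rs (pre ++ rest.eraseIdx j))).sum := by
  intro rest
  induction rest with
  | nil => intro pre; rw [rowExp]; simp
  | cons c cs ih =>
      intro pre
      rw [rowExp, ih (pre ++ [c])]
      simp only [List.length_cons, List.range_succ_eq_map, List.map_cons, List.sum_cons,
        List.map_map, List.getD_cons_zero, List.eraseIdx_cons_zero, pow_zero, one_mul]
      have hmap : (List.range cs.length).map
            ((fun j => (-1 : Int) ^ j * r.getD ((c :: cs).getD j 0) 0 *
              detS rs (pre ++ (c :: cs).eraseIdx j)) ∘ Nat.succ)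
          = (List.range cs.length).map
            (fun j => -((-1 : Int) ^ j * r.getD (cs.getD j 0) 0 *
              detS rs (pre ++ [c] ++ cs.eraseIdx j))) := by
        apply List.map_congr_left
        intro j _
        simp only [Function.comp_apply, List.getD_cons_succ, List.eraseIdx_cons_succ,
          List.append_assoc, List.singleton_append]
        rw [pow_succ]
        ring
      rw [hmap, sum_map_neg]
      ring

lemma detS_cons (r : List Int) (rs : List (List Int)) (cols : List Nat) :
    detS (r :: rs) cols =
      ((List.range cols.length).map (fun j => (-1 : Int) ^ j * r.getD (cols.getD j 0) 0 *
        detS rs (cols.eraseIdx j))).sum := by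
  rw [detS, rowExp_sum]
  simp

-- materialising the selected columns commutes with detS
lemma detS_sel (rows : List (List Int)) :
    ∀ (cols cols2 : List Nat), (∀ j ∈ cols2, j < cols.length) →
      detS (rows.map (fun r => cols.map (fun c => r.getD c 0))) cols2 =
        detS rows (cols2.map (fun j => cols.getD j 0)) := by
  induction rows with
  | nil => intro cols cols2 _; rw [List.map_nil, detS, detS]
  | cons r rs ih =>
      intro cols cols2 h
      rw [List.map_cons, detS_cons, detS_cons]
      simp only [List.length_map]
      apply congrArg List.sum
      apply List.map_congr_left
      intro j hj
      simp only [List.mem_range] at hj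
      have hmem : cols2.getD j 0 ∈ cols2 := by
        rw [List.getD_eq_getElem _ _ hj]
        exact List.getElem_mem hj
      have hlt : cols2.getD j 0 < cols.length := h _ hmem
      have h1 : (cols.map (fun c => r.getD c 0)).getD (cols2.getD j 0) 0
          = r.getD (cols.getD (cols2.getD j 0) 0) 0 := by
        rw [List.getD_eq_getElem (cols.map (fun c => r.getD c 0)) 0
              (by simpa using hlt),
            List.getElem_map, List.getD_eq_getElem _ _ hlt]
      have h2 : (cols2.map (fun j => cols.getD j 0)).getD j 0
          = cols.getD (cols2.getD j 0) 0 := by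
        rw [List.getD_eq_getElem (cols2.map (fun j => cols.getD j 0)) 0
              (by simpa using hj),
            List.getElem_map, List.getD_eq_getElem _ _ hj]
      have h3 : detS (rs.map (fun r => cols.map (fun c => r.getD c 0))) (cols2.eraseIdx j)
          = detS rs ((cols2.map (fun j => cols.getD j 0)).eraseIdx j) := by
        rw [List.eraseIdx_map]
        apply ih
        intro x hx
        have : x ∈ cols2 := by
          rw [List.eraseIdx_eq_take_drop_succ] at hx
          rcases List.mem_append.1 hx with hx | hx
          · exact List.mem_of_mem_take hx
          · exact List.mem_of_mem_drop hx
        exact h _ this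
      rw [h1, h2, h3]

lemma map_getD_range (l : List Nat) :
    (List.range l.length).map (fun j => l.getD j 0) = l := by
  apply List.ext_getElem
  · simp
  · intro i h1 h2
    simp [List.getElem?_eq_getElem h2]

lemma range_filter_ne (s j : Nat) (hj : j < s) :
    (List.range s).filter (fun k => decide (k ≠ j)) = (List.range s).eraseIdx j := by
  have hdrop : (List.range s).drop (j + 1) = List.range' (j + 1) (s - (j + 1)) := by
    rw [List.range_eq_range', List.drop_range']
    congr 1
    omega
  have hsplit : List.range s = List.range (j + 1) ++ List.range' (j + 1) (s - (j + 1)) := by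
    have h := @List.range'_append 0 (j + 1) (s - (j + 1)) 1
    have e1 : 0 + 1 * (j + 1) = j + 1 := by omega
    have e2 : j + 1 + (s - (j + 1)) = s := by omega
    rw [e1, e2] at h
    rw [List.range_eq_range', ← h, ← List.range_eq_range']
  rw [List.eraseIdx_eq_take_drop_succ, List.take_range, Nat.min_eq_left (Nat.le_of_lt hj),
    hdrop]
  rw [hsplit, List.filter_append, List.range_succ, List.filter_append]
  have h1 : (List.range j).filter (fun k => decide (k ≠ j)) = List.range j := by
    rw [List.filter_eq_self]
    intro a ha
    simp only [List.mem_range] at ha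
    simp
    omega
  have h2 : ([j].filter (fun k => decide (k ≠ j))) = [] := by simp
  have h3 : (List.range' (j + 1) (s - (j + 1))).filter (fun k => decide (k ≠ j))
      = List.range' (j + 1) (s - (j + 1)) := by
    rw [List.filter_eq_self]
    intro a ha
    rw [List.mem_range'_1] at ha
    simp
    omega
  rw [h1, h2, h3]
  simp

-- mod helpers (Python % is Int.fmod)
lemma pymod_congr (n x y : Int) (h : n ∣ x - y) :
    PySem.Int.mod x n = PySem.Int.mod y n := by
  show Int.fmod x n = Int.fmod y n
  rw [Int.fmod_eq_fmod_iff_fmod_sub_eq_zero]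
  exact (PySem.Int.mod_eq_zero_iff_dvd _ _).2 h

lemma pymod_sub_dvd (n x : Int) : n ∣ PySem.Int.mod x n - x := by
  have h := Int.fmod_add_mul_fdiv x n
  have : PySem.Int.mod x n - x = -(n * Int.fdiv x n) := by
    show Int.fmod x n - x = _; omega
  rw [this]
  exact (dvd_neg).2 ⟨Int.fdiv x n, rfl⟩

lemma dvd_sum_sub (n : Int) {α : Type} (l : List α) (f g : α → Int)
    (h : ∀ x ∈ l, n ∣ f x - g x) :
    n ∣ ((l.map f).sum - (l.map g).sum) := by
  induction l with
  | nil => simp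
  | cons a l ih =>
      simp only [List.map_cons, List.sum_cons]
      have h1 := h a (by simp)
      have h2 := ih (fun x hx => h x (by simp [hx]))
      have : f a + (l.map f).sum - (g a + (l.map g).sum)
           = (f a - g a) + ((l.map f).sum - (l.map g).sum) := by ring
      rw [this]
      exact dvd_add h1 h2

-- ===== A-side: A equals mod (detS · range) n =====
lemma A_eq (n : Int) : ∀ (N : Nat) (m : List (List Int)), m.length = N →
    (∀ r ∈ m, r.length = m.length) →
    (m.length = 1 → matrix_determinant_HILL n m = detS m (List.range 1)) ∧
    (2 ≤ m.length → matrix_determinant_HILL n m =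
        PySem.Int.mod (detS m (List.range m.length)) n) := by
  intro N
  induction N using Nat.strong_induction_on with
  | _ N ih =>
  intro m hN hsq
  constructor
  · -- size-1 branch of A
    intro h1
    rw [matrix_determinant_HILL]
    rw [if_pos (by exact_mod_cast h1 : ((m.length : Nat) : Int) = 1)]
    obtain ⟨r, hr⟩ : ∃ r, m = [r] := by
      cases m with
      | nil => simp at h1
      | cons a l =>
          cases l with
          | nil => exact ⟨a, rfl⟩
          | cons b l' => simp at h1
    subst hr
    rw [detS, show List.range 1 = [0] from rfl, rowExp, rowExp, detS]
    simp [PySem.List.pyGetD_zero]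
  · intro h2
    have hs1 : ((m.length : Nat) : Int) ≠ 1 := by
      exact_mod_cast (by omega : m.length ≠ 1)
    rw [matrix_determinant_HILL]
    rw [if_neg hs1]
    rw [List.foldl_attach (l := PySem.List.pyRange 0 (m.length : Int) 1)
        (f := fun det (j : Int) => det + (-1) ^ j.toNat *
            PySem.List.pyGetD (PySem.List.pyGetD m 0 []) j 0 *
            matrix_determinant_HILL n ((PySem.List.pyRange 1 (m.length : Int) 1).map (fun i =>
              ((PySem.List.pyRange 0 (m.length : Int) 1).filter (fun k => decide (k ≠ j))).map (fun k =>
                PySem.List.pyGetD (PySem.List.pyGetD m i []) k 0))))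
        (b := 0)]
    rw [PySem.List.pyRange_zero_nat m.length]
    rw [List.foldl_map]
    rw [PySem.List.foldl_add]
    rw [zero_add]
    obtain ⟨r, rs, hm⟩ : ∃ r rs, m = r :: rs := by
      cases m with
      | nil => simp at h2
      | cons a l => exact ⟨_, _, rfl⟩
    have h0 : m.getD 0 [] = r := by rw [hm]; rfl
    have hd1 : m.drop 1 = rs := by rw [hm]; rfl
    apply pymod_congr
    have hdet : detS m (List.range m.length) = ((List.range m.length).map (fun j =>
        (-1 : Int) ^ j * (r.getD j 0) * detS rs ((List.range m.length).eraseIdx j))).sum := by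
      conv_lhs => rw [hm]
      rw [detS_cons, List.length_range]
      rw [show (r :: rs).length = m.length from by rw [hm]]
      apply congrArg List.sum
      apply List.map_congr_left
      intro j hj
      simp only [List.mem_range] at hj
      rw [List.getD_eq_getElem (List.range m.length) 0 (by simpa using hj),
        List.getElem_range]
    rw [hdet]
    apply dvd_sum_sub
    intro j hj
    simp only [List.mem_range] at hj
    -- clean up the scalar part
    have hsc : PySem.List.pyGetD (PySem.List.pyGetD m 0 []) ((j : Nat) : Int) 0 = r.getD j 0 := by
      rw [PySem.List.pyGetD_zero, PySem.List.pyGetD_natCast, h0]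
    -- the materialised minor
    have hcf : (((List.range m.length).map (fun k : Nat => (k : Int))).filter
          (fun k => decide (k ≠ ((j : Nat) : Int))))
        = ((List.range m.length).filter (fun k => decide (k ≠ j))).map (fun k : Nat => (k : Int)) := by
      rw [List.filter_map]
      congr 1
      apply List.filter_congr
      intro x _
      simp [Function.comp, Nat.cast_inj]
    have hminor : ((PySem.List.pyRange 1 (m.length : Int) 1).map (fun i =>
          (((List.range m.length).map (fun k : Nat => (k : Int))).filter
            (fun k => decide (k ≠ ((j : Nat) : Int)))).map (fun k =>
              PySem.List.pyGetD (PySem.List.pyGetD m i []) k 0)))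
        = (m.drop 1).map (fun row =>
            ((List.range m.length).filter (fun k => decide (k ≠ j))).map (fun c => row.getD c 0)) := by
      rw [show (fun i => (((List.range m.length).map (fun k : Nat => (k : Int))).filter
            (fun k => decide (k ≠ ((j : Nat) : Int)))).map (fun k =>
              PySem.List.pyGetD (PySem.List.pyGetD m i []) k 0))
          = ((fun row => (((List.range m.length).map (fun k : Nat => (k : Int))).filter
            (fun k => decide (k ≠ ((j : Nat) : Int)))).map (fun k =>
              PySem.List.pyGetD row k 0)) ∘ (fun i => PySem.List.pyGetD m i [])) from rfl]
      rw [← List.map_map]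
      rw [PySem.List.map_pyGetD_pyRange' m [] (by norm_num : (0:Int) ≤ 1)]
      rw [show ((1 : Int)).toNat = 1 from rfl]
      apply List.map_congr_left
      intro row _
      rw [hcf, List.map_map]
      apply List.map_congr_left
      intro c _
      simp [Function.comp, PySem.List.pyGetD_natCast]
    rw [hminor, hsc]
    set colsN := (List.range m.length).filter (fun k => decide (k ≠ j)) with hcolsN
    set M := (m.drop 1).map (fun row => colsN.map (fun c => row.getD c 0)) with hM
    have hercols : colsN = (List.range m.length).eraseIdx j := range_filter_ne m.length j hj
    have hcolsNlen : colsN.length = m.length - 1 := by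
      rw [hercols, List.length_eraseIdx]
      simp [hj]
    have hMlen : M.length = m.length - 1 := by
      rw [hM]
      simp
    have hMsq : ∀ row' ∈ M, row'.length = M.length := by
      intro row' hrow'
      rw [hM] at hrow'
      obtain ⟨row, _, hrr⟩ := List.mem_map.1 hrow'
      rw [← hrr, List.length_map, hMlen, hcolsNlen]
    have hIH := ih (m.length - 1) (by omega) M (by rw [hMlen]) hMsq
    have hsel : detS M (List.range colsN.length) = detS (m.drop 1) colsN := by
      have hss := detS_sel (m.drop 1) colsN (List.range colsN.length)
        (by intro x hx; simpa using hx)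
      rw [hM, hss, map_getD_range]
    have hAM : n ∣ matrix_determinant_HILL n M - detS (m.drop 1) colsN := by
      by_cases hM1 : M.length = 1
      · rw [hIH.1 hM1]
        rw [show List.range 1 = List.range colsN.length from by rw [hcolsNlen, ← hMlen, hM1]]
        rw [hsel]
        simp
      · have h2M : 2 ≤ M.length := by omega
        rw [hIH.2 h2M]
        rw [show List.range M.length = List.range colsN.length from by rw [hcolsNlen, ← hMlen]]
        rw [hsel]
        exact pymod_sub_dvd n (detS (m.drop 1) colsN)
    rw [← hercols, hd1] at *
    have hfact : (-1 : Int) ^ (((j : Nat) : Int)).toNat * r.getD j 0 * matrix_determinant_HILL n M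
        - (-1 : Int) ^ j * r.getD j 0 * detS rs colsN
        = (-1 : Int) ^ j * r.getD j 0 * (matrix_determinant_HILL n M - detS rs colsN) := by
      rw [Int.toNat_natCast]
      ring
    rw [hfact]
    exact Dvd.dvd.mul_left (by rw [← hd1]; exact hAM) _

-- ===== B-side: bitmask DP =====
def colsOf (s mask : Nat) : List Nat := (List.range s).filter (fun c => mask.testBit c)
def bcN (mask : Nat) : Nat := PySem.Int.bitCount (mask : Int)
def Hval (m : List (List Int)) (s mask : Nat) : Int :=
  detS (m.drop (s - bcN mask)) (colsOf s mask)

lemma bc_eq : ∀ (s mask : Nat), mask < 2 ^ s → bcN mask = (colsOf s mask).length := by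
  intro s
  induction s with
  | zero =>
      intro mask h
      have : mask = 0 := by simpa using h
      subst this
      simp [bcN, colsOf, PySem.Int.bitCount_zero]
  | succ s ih =>
      intro mask h
      by_cases h0 : mask = 0
      · subst h0
        simp [bcN, colsOf, PySem.Int.bitCount_zero, Nat.zero_testBit]
      · have hrec := PySem.Int.bitCount_natCast (m := mask) (by omega)
        have hhalf : PySem.Int.bitCount ((mask / 2 : Nat) : Int)
            = (colsOf s (mask / 2)).length := by
          exact ih (mask / 2) (by omega)
        unfold bcN
        rw [hrec, hhalf]
        unfold colsOf
        rw [List.range_succ_eq_map, List.filter_cons]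
        have hmap : (List.map Nat.succ (List.range s)).filter (fun c => mask.testBit c)
            = List.map Nat.succ ((List.range s).filter (fun c => (mask / 2).testBit c)) := by
          rw [List.filter_map]
          congr 1
          apply List.filter_congr
          intro x _
          simp [Function.comp, Nat.testBit_add_one]
        rw [hmap]
        by_cases hb : mask.testBit 0 = true
        · have hm : mask % 2 = 1 := by
            rw [Nat.testBit_zero] at hb
            simpa using hb
          simp [hb]
          omega
        · rw [Bool.not_eq_true] at hb
          have hm : mask % 2 = 0 := by
            rw [Nat.testBit_zero] at hb
            simp at hb
            omega
          simp [hb]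
          omega

lemma colsOf_clear (s mask c : Nat) (pre suf : List Nat)
    (h : colsOf s mask = pre ++ c :: suf) :
    colsOf s (mask ^^^ (1 <<< c)) = pre ++ suf := by
  have hc : mask.testBit c = true := by
    have hm : c ∈ colsOf s mask := by rw [h]; simp
    unfold colsOf at hm
    simpa using (List.mem_filter.1 hm).2
  have hnd : (colsOf s mask).Nodup := List.Nodup.filter _ List.nodup_range
  rw [h, List.nodup_append] at hnd
  have hcpre : c ∉ pre := fun hm => (hnd.2.2 c hm c (by simp)) rfl
  have hcsuf : c ∉ suf := by
    have h' := hnd.2.1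
    rw [List.nodup_cons] at h'
    exact h'.1
  have key : colsOf s (mask ^^^ (1 <<< c))
      = (colsOf s mask).filter (fun k => decide (k ≠ c)) := by
    unfold colsOf
    have hpt : ∀ x ∈ List.range s,
        (mask ^^^ (1 <<< c)).testBit x = (decide (x ≠ c) && mask.testBit x) := by
      intro x _
      rw [Nat.one_shiftLeft, Nat.testBit_xor, Nat.testBit_two_pow]
      by_cases hx : x = c
      · subst hx; simp [hc]
      · have hne : ¬ (c = x) := fun e => hx e.symm
        simp [hne, hx]
    rw [List.filter_congr hpt, ← List.filter_filter]
  rw [key, h, List.filter_append, List.filter_cons]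
  have e1 : pre.filter (fun k => decide (k ≠ c)) = pre := by
    rw [List.filter_eq_self]
    intro a ha
    simp
    exact fun e => hcpre (e ▸ ha)
  have e2 : suf.filter (fun k => decide (k ≠ c)) = suf := by
    rw [List.filter_eq_self]
    intro a ha
    simp
    exact fun e => hcsuf (e ▸ ha)
  simp only [ne_eq, decide_not] at e1 e2 ⊢
  rw [e1, e2]
  simp

lemma xor_lt (mask c : Nat) (h : mask.testBit c = true) : mask ^^^ (1 <<< c) < mask := by
  rw [Nat.one_shiftLeft]
  apply Nat.lt_of_testBit c
  · rw [Nat.testBit_xor, h, Nat.testBit_two_pow]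
    simp
  · exact h
  · intro i hi
    rw [Nat.testBit_xor, Nat.testBit_two_pow]
    have : ¬ (c = i) := by omega
    simp [this]

lemma colsOf_ne_nil (s mask : Nat) (h0 : 0 < mask) (hlt : mask < 2 ^ s) :
    colsOf s mask ≠ [] := by
  intro hnil
  unfold colsOf at hnil
  rw [List.filter_eq_nil_iff] at hnil
  have : mask = 0 := by
    apply Nat.eq_of_testBit_eq
    intro i
    rw [Nat.zero_testBit]
    by_cases hi : i < s
    · have := hnil i (by simpa [List.mem_range] using hi)
      simpa using this
    · exact Nat.testBit_eq_false_of_lt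
        (lt_of_lt_of_le hlt (Nat.pow_le_pow_right (by omega) (by omega)))
  omega

lemma inner_loop (m : List (List Int)) (s : Nat) (f : List Int) (mask : Nat)
    (hlt : mask < 2 ^ s)
    (hf : ∀ k, k < mask → f.getD k 0 = Hval m s k) :
    ∀ (rest pre : List Nat) (sign acc : Int),
      colsOf s mask = pre ++ rest →
      ((rest.foldl (fun sa c =>
          (- sa.1, sa.2 + sa.1 * (m.getD (s - bcN mask) []).getD c 0 *
            f.getD (mask ^^^ (1 <<< c)) 0)) (sign, acc)).2
        = acc + sign * rowExp (m.getD (s - bcN mask) [])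
            (m.drop (s - bcN mask + 1)) pre rest) := by
  intro rest
  induction rest with
  | nil =>
      intro pre sign acc _
      rw [rowExp]
      simp
  | cons c cs ih =>
      intro pre sign acc hcols
      have hcmem : c ∈ colsOf s mask := by rw [hcols]; simp
      have hcbit : mask.testBit c = true := by
        unfold colsOf at hcmem
        simpa using (List.mem_filter.1 hcmem).2
      have hxlt : mask ^^^ (1 <<< c) < mask := xor_lt mask c hcbit
      have hclear : colsOf s (mask ^^^ (1 <<< c)) = pre ++ cs :=
        colsOf_clear s mask c pre cs hcols
      have hbc : bcN mask = (pre ++ c :: cs).length := by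
        rw [bc_eq s mask hlt, hcols]
      have hbc' : bcN (mask ^^^ (1 <<< c)) = (pre ++ cs).length := by
        rw [bc_eq s _ (lt_trans hxlt hlt), hclear]
      have hbcle : bcN mask ≤ s := by
        rw [bc_eq s mask hlt]
        unfold colsOf
        exact le_trans (List.length_filter_le _ _) (by simp)
      have hdropidx : s - bcN (mask ^^^ (1 <<< c)) = s - bcN mask + 1 := by
        simp only [List.length_append, List.length_cons] at hbc hbc'
        omega
      have hfv : f.getD (mask ^^^ (1 <<< c)) 0
          = detS (m.drop (s - bcN mask + 1)) (pre ++ cs) := by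
        rw [hf _ hxlt]
        unfold Hval
        rw [hclear, hdropidx]
      rw [List.foldl_cons]
      rw [ih (pre ++ [c]) (- sign)
          (acc + sign * (m.getD (s - bcN mask) []).getD c 0 * f.getD (mask ^^^ (1 <<< c)) 0)
          (by rw [hcols]; simp)]
      rw [rowExp, hfv]
      ring

lemma dp_fold (m : List (List Int)) :
    ∀ (cnt start : Nat) (f : List Int),
      f.length = 2 ^ m.length → 1 ≤ start → start + cnt ≤ 2 ^ m.length →
      (∀ k, k < start → f.getD k 0 = Hval m m.length k) →
      (((List.range' start cnt).foldl (fun (f : List Int) (mask : Nat) =>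
          let row : List Int := m.getD (m.length - PySem.Int.bitCount (mask : Int)) []
          let sa : Int × Int :=
            (List.range m.length).foldl (fun sa c =>
              if (mask >>> c) &&& 1 ≠ 0 then
                (- sa.1, sa.2 + sa.1 * row.getD c 0 * f.getD (mask ^^^ (1 <<< c)) 0)
              else sa) (1, 0)
          f.set mask sa.2) f).length = 2 ^ m.length) ∧
      (∀ k, k < start + cnt →
        ((List.range' start cnt).foldl (fun (f : List Int) (mask : Nat) =>
          let row : List Int := m.getD (m.length - PySem.Int.bitCount (mask : Int)) []
          let sa : Int × Int :=
            (List.range m.length).foldl (fun sa c =>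
              if (mask >>> c) &&& 1 ≠ 0 then
                (- sa.1, sa.2 + sa.1 * row.getD c 0 * f.getD (mask ^^^ (1 <<< c)) 0)
              else sa) (1, 0)
          f.set mask sa.2) f).getD k 0 = Hval m m.length k) := by
  intro cnt
  induction cnt with
  | zero =>
      intro start f hlen h1 hle hinv
      constructor
      · simpa using hlen
      · intro k hk
        simpa using hinv k (by omega)
  | succ cnt ih =>
      intro start f hlen h1 hle hinv
      have hstartlt : start < 2 ^ m.length := by omega
      have hs1 : 1 ≤ m.length := by
        by_contra hh
        have : m.length = 0 := by omega
        rw [this] at hstartlt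
        omega
      -- the condition of the ported if equals testBit
      have hcond : ∀ (mask c : Nat), ((mask >>> c) &&& 1 ≠ 0) ↔ (mask.testBit c = true) := by
        intro mask c
        rw [Nat.and_one_is_mod, Nat.shiftRight_eq_div_pow, Nat.testBit_eq_decide_div_mod_eq]
        simp only [ne_eq, decide_eq_true_eq]
        omega
      -- value written at `start` is Hval
      have hval : ((List.range m.length).foldl (fun sa c =>
            if (start >>> c) &&& 1 ≠ 0 then
              (- sa.1, sa.2 + sa.1 * (m.getD (m.length - PySem.Int.bitCount (start : Int)) []).getD c 0 *
                f.getD (start ^^^ (1 <<< c)) 0)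
            else sa) ((1 : Int), (0 : Int))).2 = Hval m m.length start := by
        have hfun : (fun (sa : Int × Int) c =>
              if (start >>> c) &&& 1 ≠ 0 then
                (- sa.1, sa.2 + sa.1 * (m.getD (m.length - PySem.Int.bitCount (start : Int)) []).getD c 0 *
                  f.getD (start ^^^ (1 <<< c)) 0)
              else sa)
            = (fun (sa : Int × Int) c =>
              if start.testBit c = true then
                (- sa.1, sa.2 + sa.1 * (m.getD (m.length - PySem.Int.bitCount (start : Int)) []).getD c 0 *
                  f.getD (start ^^^ (1 <<< c)) 0)
              else sa) := by
          funext sa c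
          by_cases hb : start.testBit c = true
          · rw [if_pos ((hcond start c).2 hb), if_pos hb]
          · rw [if_neg (fun hh => hb ((hcond start c).1 hh)), if_neg hb]
        rw [hfun, ← List.foldl_filter]
        have hinner := inner_loop m m.length f start hstartlt
          (fun k hk => hinv k hk) (colsOf m.length start) [] 1 0 (by simp)
        unfold colsOf bcN at hinner
        rw [hinner]
        have hbcpos : 1 ≤ bcN start := by
          rw [bc_eq m.length start hstartlt]
          have := colsOf_ne_nil m.length start (by omega) hstartlt
          cases hc : colsOf m.length start with
          | nil => exact absurd hc this
          | cons a l => simp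
        have hbcle : bcN start ≤ m.length := by
          rw [bc_eq m.length start hstartlt]
          unfold colsOf
          exact le_trans (List.length_filter_le _ _) (by simp)
        unfold bcN at hbcpos hbcle
        have hidx : m.length - PySem.Int.bitCount (start : Int) < m.length := by omega
        unfold Hval colsOf bcN
        rw [List.drop_eq_getElem_cons hidx, detS]
        rw [List.getD_eq_getElem m [] hidx]
        ring
      rw [List.range'_succ, List.foldl_cons]
      have hlen' : (f.set start (((List.range m.length).foldl (fun sa c =>
            if (start >>> c) &&& 1 ≠ 0 then
              (- sa.1, sa.2 + sa.1 * (m.getD (m.length - PySem.Int.bitCount (start : Int)) []).getD c 0 *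
                f.getD (start ^^^ (1 <<< c)) 0)
            else sa) ((1 : Int), (0 : Int))).2)).length = 2 ^ m.length := by
        rw [List.length_set]; exact hlen
      have hinv' : ∀ k, k < start + 1 →
          (f.set start (((List.range m.length).foldl (fun sa c =>
            if (start >>> c) &&& 1 ≠ 0 then
              (- sa.1, sa.2 + sa.1 * (m.getD (m.length - PySem.Int.bitCount (start : Int)) []).getD c 0 *
                f.getD (start ^^^ (1 <<< c)) 0)
            else sa) ((1 : Int), (0 : Int))).2)).getD k 0 = Hval m m.length k := by
        intro k hk
        by_cases hks : k = start
        · subst hks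
          rw [List.getD_eq_getElem?_getD, List.getElem?_set]
          simp only [hlen]
          rw [if_pos hstartlt]
          simpa using hval
        · rw [List.getD_eq_getElem?_getD, List.getElem?_set, if_neg (fun hh => hks hh.symm),
            ← List.getD_eq_getElem?_getD]
          exact hinv k (by omega)
      have hres := ih (start + 1) _ hlen' (by omega) (by omega) hinv'
      refine ⟨hres.1, ?_⟩
      intro k hk
      exact hres.2 k (by omega)

lemma B_eq (n : Int) (m : List (List Int)) (hs : m.length ≠ 1) :
    matrix_determinant_HILL_alt n m =
      PySem.Int.mod (detS m (List.range m.length)) n := by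
  have hcast : ((m.length : Nat) : Int) ≠ 1 := by exact_mod_cast hs
  have hpow1 : 1 ≤ 2 ^ m.length := Nat.one_le_two_pow
  simp only [matrix_determinant_HILL_alt]
  rw [if_neg hcast]
  rw [show (1 <<< m.length) = 2 ^ m.length from Nat.one_shiftLeft m.length]
  have hbase : ∀ k, k < 1 →
      ((List.replicate (2 ^ m.length) (0 : Int)).set 0 1).getD k 0 = Hval m m.length k := by
    intro k hk
    have hk0 : k = 0 := by omega
    subst hk0
    have hget : ((List.replicate (2 ^ m.length) (0 : Int)).set 0 1)[0]? = some 1 := by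
      rw [List.getElem?_set]
      simp [List.length_replicate, Nat.two_pow_pos m.length]
    rw [List.getD_eq_getElem?_getD, hget]
    have hc0 : colsOf m.length 0 = [] := by
      unfold colsOf
      rw [List.filter_eq_nil_iff]
      intro a _
      simp [Nat.zero_testBit]
    unfold Hval bcN
    rw [hc0, show PySem.Int.bitCount ((0 : Nat) : Int) = 0 from by
        norm_num [PySem.Int.bitCount_zero],
      Nat.sub_zero, List.drop_length, detS]
    rfl
  have hdp := dp_fold m (2 ^ m.length - 1) 1 ((List.replicate (2 ^ m.length) (0 : Int)).set 0 1)
      (by simp) (le_refl 1) (by have h := hpow1; omega) hbase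
  have hfin := hdp.2 (2 ^ m.length - 1) (by omega)
  rw [hfin]
  have hcols : colsOf m.length (2 ^ m.length - 1) = List.range m.length := by
    unfold colsOf
    rw [List.filter_eq_self]
    intro a ha
    rw [Nat.testBit_two_pow_sub_one]
    simp only [List.mem_range] at ha
    simpa using ha
  have hbcfull : bcN (2 ^ m.length - 1) = m.length := by
    rw [bc_eq m.length _ (by omega), hcols, List.length_range]
  unfold Hval
  rw [hcols, hbcfull, Nat.sub_self, List.drop_zero]

-- ===== assembly =====
lemma A_empty (n : Int) : matrix_determinant_HILL n [] = PySem.Int.mod 0 n := by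
  rw [matrix_determinant_HILL]
  norm_num
  rfl

lemma B_empty (n : Int) : matrix_determinant_HILL_alt n [] = PySem.Int.mod 1 n := by
  rfl

-- ===== VERDICT (by name: the statement is the Claim_ definition above) =====
theorem matrix_determinant_HILL_spec : Claim_unchanged_matrix_determinant_HILL := by
  intro n m _ hpre hnd
  rcases hpre with ⟨h1, _⟩ | ⟨hne, hsq, hn0⟩
  · have hc : ((m.length : Nat) : Int) = 1 := by exact_mod_cast h1
    rw [matrix_determinant_HILL]
    rw [matrix_determinant_HILL_alt]
    rw [if_pos hc, if_pos hc]
  · by_cases hmnil : m = []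
    · subst hmnil
      have hn : n = 1 ∨ n = -1 := by
        by_cases hh1 : n = 1
        · exact Or.inl hh1
        · by_cases hh2 : n = -1
          · exact Or.inr hh2
          · exact absurd ⟨rfl, hh1, hh2⟩ hnd
      rw [A_empty, B_empty]
      rcases hn with hn | hn <;> rw [hn] <;> decide
    · have hlen0 : m.length ≠ 0 := by
        simpa [List.length_eq_zero_iff] using hmnil
      have h2 : 2 ≤ m.length := by omega
      rw [(A_eq n m.length m rfl hsq).2 h2, B_eq n m hne]

theorem matrix_determinant_HILL_changed : Claim_changed_matrix_determinant_HILL := by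
  unfold Claim_changed_matrix_determinant_HILL
  refine ⟨by decide, by decide, by decide, ?_, ?_, by decide⟩
  · show matrix_determinant_HILL 5 [] = 0
    rw [A_empty]; decide
  · show matrix_determinant_HILL_alt 5 [] = 1
    rw [B_empty]; decide

theorem matrix_determinant_HILL_tight : Claim_exact_matrix_determinant_HILL := by
  intro n m _ hpre hd
  obtain ⟨hm, hn1, hn2⟩ := hd
  subst hm
  rcases hpre with ⟨hl, _⟩ | ⟨_, _, hn0⟩
  · simp at hl
  · rw [A_empty, B_empty]
    intro heq
    have hz : PySem.Int.mod 0 n = 0 := Int.zero_fmod n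
    rw [hz] at heq
    have hdvd : n ∣ 1 := (PySem.Int.mod_eq_zero_iff_dvd 1 n).1 heq.symm
    have := Int.isUnit_iff.1 (isUnit_of_dvd_one hdvd)
    tauto
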